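-- pv_equiv track=rewrite | github.com/robertmetzker/robertmetzker | bwcrun/run_mod_ind_vsql_snow.py | get_batch
-- ===== SOURCE A (Python) =====
-- def get_batch( rows, col ):
--     #row generator: pec_pes_rows,column:'CLM_AGRE_ID'
--     #batch only has 1 element in it at most
--     #example batch = AGRE_ID:[ row, row, row ]
--     batch = {}
--     for row in rows:
--         #col_value = getattr( row, col )
--         col_value = row[col]
--         if col_value not in batch:
--             if batch:
--                 #got new key, yield rows from old key
--                 old_rows = batch.popitem()[1]
--                 yield old_rows
--                 #batch is now empty
--             batch[col_value] = []
--         #always runs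
--         batch[col_value].append( row )
--     if batch:
--         yield batch.popitem()[1]
-- ===== SOURCE B (Python) =====
-- def get_batch(rows, col):
--     # Two-pointer scan: find each maximal run of consecutive rows sharing rows[i][col],
--     # yield the run as a slice, continue after it.
--     i, n = 0, len(rows)
--     while i < n:
--         k = rows[i][col]
--         j = i + 1
--         while j < n and rows[j][col] == k:
--             j += 1
--         yield rows[i:j]
--         i = j
-- ===== Notes on version B (the rewrite author's own statement) =====
-- stated objective: simpler
-- what changed: Replaces A's single-entry dict state machine (membership test, popitem, insert, append per row) with a direct two-pointer scan that yields each maximal run of equal-key rows as a slice.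
import Mathlib
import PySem

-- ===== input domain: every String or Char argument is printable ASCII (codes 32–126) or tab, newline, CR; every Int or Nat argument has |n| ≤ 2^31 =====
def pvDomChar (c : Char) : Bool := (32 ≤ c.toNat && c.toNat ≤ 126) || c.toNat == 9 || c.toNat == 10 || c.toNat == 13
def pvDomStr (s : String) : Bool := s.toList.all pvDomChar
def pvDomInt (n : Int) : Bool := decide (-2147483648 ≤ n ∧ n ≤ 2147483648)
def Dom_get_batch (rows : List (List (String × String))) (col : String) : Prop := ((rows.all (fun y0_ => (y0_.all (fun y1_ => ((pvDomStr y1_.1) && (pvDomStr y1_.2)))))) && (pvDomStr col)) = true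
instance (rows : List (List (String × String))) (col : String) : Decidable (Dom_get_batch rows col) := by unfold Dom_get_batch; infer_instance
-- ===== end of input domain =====

-- B replaces A's one-entry-dict state machine with a two-pointer run scan (objective: simpler).
-- Both are generators in Python; the ports return the list of yielded groups.

-- ===== PORT A =====
-- row[col]: rows are dicts; dup-keyed pairs overwrite as in dict(pairs) (PySem.Dict.ofList).
-- Pre_ excludes the KeyError case; the .getD "" default is never reached inside Pre_.
def pvKey (col : String) (row : List (String × String)) : String :=
  ((PySem.Dict.ofList row).get? col).getD ""

-- one iteration of A's for-loop over (out, batch); popitem pops the LAST-inserted pair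
-- (exact: Dict's items list is insertion order)
def pvStepA (col : String)
    (acc : List (List (List (String × String))) × PySem.Dict String (List (List (String × String))))
    (row : List (String × String)) :
    List (List (List (String × String))) × PySem.Dict String (List (List (String × String))) :=
  let out := acc.1
  let batch := acc.2
  let cv := pvKey col row
  let (out, batch) :=
    if batch.contains cv then (out, batch)
    else
      let (out, batch) :=
        match batch.items.getLast? with
        | some p => (out ++ [p.2], PySem.Dict.mk batch.items.dropLast)  -- if batch: yield popitem()[1]
        | none => (out, batch)
      (out, batch.insert cv [])
  (out, batch.modify cv [] (fun l => l ++ [row]))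

-- trailing 'if batch: yield batch.popitem()[1]'
def pvFinishA (acc : List (List (List (String × String))) × PySem.Dict String (List (List (String × String)))) :
    List (List (List (String × String))) :=
  match acc.2.items.getLast? with
  | some p => acc.1 ++ [p.2]
  | none => acc.1

def get_batch (rows : List (List (String × String))) (col : String) : List (List (List (String × String))) :=
  pvFinishA (rows.foldl (pvStepA col) ([], PySem.Dict.empty))

-- ===== PORT B =====
-- B's inner 'while j < n and rows[j][col] == k' advances past the run = takeWhile;
-- rows[i:j] is the run, the outer loop resumes at j = dropWhile.
def get_batch_alt (rows : List (List (String × String))) (col : String) : List (List (List (String × String))) :=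
  match rows with
  | [] => []
  | r :: rs =>
    (r :: rs.takeWhile (fun x => pvKey col x == pvKey col r)) ::
      get_batch_alt (rs.dropWhile (fun x => pvKey col x == pvKey col r)) col
termination_by rows.length
decreasing_by
  simp only [List.length_cons]
  exact Nat.lt_succ_of_le (List.length_dropWhile_le _ _)

-- ===== PRECONDITION & SPEC =====
-- Pre_ excludes exactly the inputs where some row lacks key col: Python A raises KeyError there (B does too).
def Pre_get_batch (rows : List (List (String × String))) (col : String) : Prop :=
  ∀ r ∈ rows, (PySem.Dict.ofList r).contains col = true
instance (rows : List (List (String × String))) (col : String) : Decidable (Pre_get_batch rows col) := by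
  unfold Pre_get_batch; infer_instance
def pvWitness_get_batch : (List (List (String × String))) × String :=
  ([[("k", "1")], [("k", "2")]], "k")

def Spec_get_batch (rows : List (List (String × String))) (col : String) (out : List (List (List (String × String)))) : Prop := out = get_batch_alt rows col
instance (rows : List (List (String × String))) (col : String) (out : List (List (List (String × String)))) : Decidable (Spec_get_batch rows col out) := by unfold Spec_get_batch; infer_instance

-- ===== CLAIM (what is proved, stated in full; the proofs are below) =====
def Claim_equal_get_batch : Prop := ∀ (rows : List (List (String × String))) (col : String), Dom_get_batch rows col → Pre_get_batch rows col → Spec_get_batch rows col (get_batch rows col)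

-- ===== LEMMAS AND PROOFS =====

-- proof-side helper: A's remaining computation when batch = {k: run}
def pvCollect (col : String) (k : String) (run : List (List (String × String))) :
    List (List (String × String)) → List (List (List (String × String)))
  | [] => [run]
  | r :: rs =>
    if pvKey col r == k then pvCollect col k (run ++ [r]) rs
    else run :: get_batch_alt (r :: rs) col

theorem pvAlt_nil (col : String) : get_batch_alt [] col = [] := by
  unfold get_batch_alt
  rfl

theorem pvAlt_cons (col : String) (r : List (String × String)) (rs : List (List (String × String))) :
    get_batch_alt (r :: rs) col =
      (r :: rs.takeWhile (fun x => pvKey col x == pvKey col r)) ::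
        get_batch_alt (rs.dropWhile (fun x => pvKey col x == pvKey col r)) col := by
  rw [get_batch_alt]

theorem pvCollect_eq (col k : String) (rs : List (List (String × String)))
    (run : List (List (String × String))) :
    pvCollect col k run rs =
      (run ++ rs.takeWhile (fun x => pvKey col x == k)) ::
        get_batch_alt (rs.dropWhile (fun x => pvKey col x == k)) col := by
  induction rs generalizing run with
  | nil => simp [pvCollect, pvAlt_nil]
  | cons r rs ih =>
    by_cases h : pvKey col r == k
    · simp [pvCollect, h, ih]
    · simp [pvCollect, h]

theorem pvFold_singleton (col k : String) (rs : List (List (String × String)))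
    (out : List (List (List (String × String)))) (run : List (List (String × String))) :
    pvFinishA (rs.foldl (pvStepA col) (out, PySem.Dict.mk [(k, run)])) =
      out ++ pvCollect col k run rs := by
  induction rs generalizing out k run with
  | nil => simp [pvFinishA, pvCollect]
  | cons r rs ih =>
    by_cases h : pvKey col r = k
    · subst h
      have hstep : pvStepA col (out, PySem.Dict.mk [(pvKey col r, run)]) r
          = (out, PySem.Dict.mk [(pvKey col r, run ++ [r])]) := by
        simp [pvStepA, PySem.Dict.contains, PySem.Dict.modify, PySem.Dict.getD,
              PySem.Dict.get?, PySem.Dict.insert]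
      rw [List.foldl_cons, hstep, ih]
      simp [pvCollect]
    · have hk : (k == pvKey col r) = false := by
        simp only [beq_eq_false_iff_ne, ne_eq]
        exact fun e => h (Eq.symm e)
      have hstep : pvStepA col (out, PySem.Dict.mk [(k, run)]) r
          = (out ++ [run], PySem.Dict.mk [(pvKey col r, [r])]) := by
        simp [pvStepA, PySem.Dict.contains, PySem.Dict.modify, PySem.Dict.getD,
              PySem.Dict.get?, PySem.Dict.insert, hk]
      rw [List.foldl_cons, hstep, ih, pvCollect_eq]
      have hcond : (pvKey col r == k) = false := by
        simp only [beq_eq_false_iff_ne, ne_eq]; exact h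
      simp [pvCollect, hcond, pvAlt_cons]

theorem get_batch_eq_alt (rows : List (List (String × String))) (col : String) :
    get_batch rows col = get_batch_alt rows col := by
  cases rows with
  | nil => simp [get_batch, pvFinishA, PySem.Dict.empty, pvAlt_nil]
  | cons r rs =>
    have h1 : pvStepA col ([], PySem.Dict.empty) r
        = ([], PySem.Dict.mk [(pvKey col r, [r])]) := by
      simp [pvStepA, PySem.Dict.contains, PySem.Dict.modify, PySem.Dict.getD,
            PySem.Dict.get?, PySem.Dict.insert, PySem.Dict.empty]
    rw [get_batch, List.foldl_cons, h1, pvFold_singleton]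
    rw [pvCollect_eq, pvAlt_cons]
    simp

-- ===== VERDICT (by name: the statement is the Claim_ definition above) =====
theorem get_batch_spec : Claim_equal_get_batch := by
  intro rows col _ _
  unfold Spec_get_batch
  exact get_batch_eq_alt rows col
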